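-- pv_equiv track=rewrite | github.com/dfuchsgruber/Violet | tools/img_dump.py | tiles_to_rows
-- ===== SOURCE A (Python) =====
-- def tiles_to_rows(tiles, tile_width, tile_height):
--     """ Builds png rows from a tile list"""
--     rows = []
--     for i in range(0, tile_height):
--         tile_line_off = tile_width * i
--         for j in range(0, 8):
--             #Build 8 rows out of one tile line
--             row = []
--             for x in range(0, tile_width):
--                 #Iterate pixelwise through all the tiles
--                 tile = tiles[tile_line_off + x] #All Pixels inside the right tile
--                 pixels = tile[8 * j : 8 * (j+1)]
--                 row += pixels
--             rows.append(row)
--     return rows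
-- ===== SOURCE B (Python) =====
-- def tiles_to_rows(tiles, tile_width, tile_height):
--     """Builds png rows from a tile list by divide and conquer: split the grid
--     of lines in half, build each half's rows recursively, and concatenate;
--     a single line's 8 rows are built by recursively halving the line and
--     merging the two 8-row blocks componentwise."""
--     w = max(tile_width, 0)
--     if tile_height <= 0:
--         return []
--     if tile_height == 1:
--         return _line_rows(tiles[:w])
--     h1 = tile_height // 2
--     return (tiles_to_rows(tiles[:w * h1], tile_width, h1)
--             + tiles_to_rows(tiles[w * h1:], tile_width, tile_height - h1))
--
--
-- def _line_rows(line):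
--     """8 pixel rows of one tile line, by halving and merging."""
--     if len(line) == 0:
--         return [[] for _ in range(8)]
--     if len(line) == 1:
--         t = line[0]
--         return [t[8 * j : 8 * j + 8] for j in range(8)]
--     m = len(line) // 2
--     a, b = _line_rows(line[:m]), _line_rows(line[m:])
--     return [a[j] + b[j] for j in range(8)]
-- ===== Notes on version B (the rewrite author's own statement) =====
-- stated objective: alternative
-- what changed: B is a divide-and-conquer algorithm: it recursively halves the grid of tile lines (and each line) and merges the two halves' 8-row blocks componentwise, instead of A's triple nested loop indexing pixelwise into the flat tile list.
import Mathlib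
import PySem

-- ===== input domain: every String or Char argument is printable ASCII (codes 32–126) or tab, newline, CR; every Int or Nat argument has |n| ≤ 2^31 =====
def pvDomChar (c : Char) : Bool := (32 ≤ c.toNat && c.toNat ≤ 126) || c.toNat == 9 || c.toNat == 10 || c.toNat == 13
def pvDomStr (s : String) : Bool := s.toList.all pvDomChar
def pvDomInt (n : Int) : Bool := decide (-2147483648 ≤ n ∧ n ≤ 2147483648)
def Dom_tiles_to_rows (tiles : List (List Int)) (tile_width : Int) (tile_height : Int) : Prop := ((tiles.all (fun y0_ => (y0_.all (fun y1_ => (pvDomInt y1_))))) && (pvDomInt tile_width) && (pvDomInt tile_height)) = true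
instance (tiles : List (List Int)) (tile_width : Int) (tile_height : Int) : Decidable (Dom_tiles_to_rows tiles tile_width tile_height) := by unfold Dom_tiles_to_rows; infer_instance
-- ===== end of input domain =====

-- B builds the rows by divide and conquer: it recursively halves the grid of tile lines (and
-- each line) and merges the halves' 8-row blocks componentwise, instead of A's triple nested
-- loop with pixelwise index arithmetic (objective: alternative algorithm, similar cost).

-- ===== PORT A =====
def tiles_to_rows (tiles : List (List Int)) (tile_width : Int) (tile_height : Int) : List (List Int) :=
  (PySem.List.pyRange 0 tile_height).foldl (fun rows i =>
    let tile_line_off := tile_width * i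
    (PySem.List.pyRange 0 8).foldl (fun rows j =>
      let row := (PySem.List.pyRange 0 tile_width).foldl (fun row x =>
        let tile := PySem.List.pyGetD tiles (tile_line_off + x) []   -- Pre_ keeps the index in range (IndexError otherwise)
        let pixels := PySem.List.slice tile (some (8 * j)) (some (8 * (j + 1)))
        row ++ pixels) ([] : List Int)
      rows ++ [row]) rows) []

-- ===== PORT B =====
-- _line_rows: 8 pixel rows of one tile line, by halving and merging
def lineRows (line : List (List Int)) : List (List Int) :=
  if line.length = 0 then (PySem.List.pyRange 0 8).map (fun _ => ([] : List Int))
  else if line.length = 1 then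
    let t := PySem.List.pyGetD line 0 []
    (PySem.List.pyRange 0 8).map (fun j => PySem.List.slice t (some (8 * j)) (some (8 * j + 8)))
  else
    let m : Nat := line.length / 2
    let a := lineRows (PySem.List.slice line none (some (m : Int)))
    let b := lineRows (PySem.List.slice line (some (m : Int)) none)
    (PySem.List.pyRange 0 8).map (fun j => PySem.List.pyGetD a j [] ++ PySem.List.pyGetD b j [])
termination_by line.length
decreasing_by
  · rw [PySem.List.slice_to_natCast]; simp; omega
  · rw [PySem.List.slice_from_natCast]; simp; omega

def tiles_to_rows_alt (tiles : List (List Int)) (tile_width : Int) (tile_height : Int) : List (List Int) :=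
  let w := max tile_width 0
  if tile_height ≤ 0 then []
  else if tile_height = 1 then lineRows (PySem.List.slice tiles none (some w))
  else
    let h1 := PySem.Int.floordiv tile_height 2
    tiles_to_rows_alt (PySem.List.slice tiles none (some (w * h1))) tile_width h1 ++
      tiles_to_rows_alt (PySem.List.slice tiles (some (w * h1)) none) tile_width (tile_height - h1)
termination_by tile_height.toNat
decreasing_by
  · have : PySem.Int.floordiv tile_height 2 = tile_height / 2 :=
      PySem.Int.floordiv_eq_ediv_of_pos (by omega)
    omega
  · have : PySem.Int.floordiv tile_height 2 = tile_height / 2 :=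
      PySem.Int.floordiv_eq_ediv_of_pos (by omega)
    omega

-- ===== PRECONDITION & SPEC =====
-- Pre_ excludes exactly the inputs where A raises IndexError: a positive grid that needs
-- more tiles than the list holds.
def Pre_tiles_to_rows (tiles : List (List Int)) (tile_width : Int) (tile_height : Int) : Prop :=
  tile_height ≤ 0 ∨ tile_width ≤ 0 ∨ tile_width * tile_height ≤ (tiles.length : Int)
instance (tiles : List (List Int)) (tile_width : Int) (tile_height : Int) : Decidable (Pre_tiles_to_rows tiles tile_width tile_height) := by unfold Pre_tiles_to_rows; infer_instance
def pvWitness_tiles_to_rows : List (List Int) × Int × Int := ([[1, 2], [3, 4]], 2, 1)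

def Spec_tiles_to_rows (tiles : List (List Int)) (tile_width : Int) (tile_height : Int) (out : List (List Int)) : Prop := out = tiles_to_rows_alt tiles tile_width tile_height
instance (tiles : List (List Int)) (tile_width : Int) (tile_height : Int) (out : List (List Int)) : Decidable (Spec_tiles_to_rows tiles tile_width tile_height out) := by unfold Spec_tiles_to_rows; infer_instance

-- ===== CLAIM (what is proved, stated in full; the proofs are below) =====
def Claim_equal_tiles_to_rows : Prop := ∀ (tiles : List (List Int)) (tile_width : Int) (tile_height : Int), Dom_tiles_to_rows tiles tile_width tile_height → Pre_tiles_to_rows tiles tile_width tile_height → Spec_tiles_to_rows tiles tile_width tile_height (tiles_to_rows tiles tile_width tile_height)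

-- ===== LEMMAS AND PROOFS =====

-- the 8-pixel chunk j of a tile
def pvChunk (j : Int) (t : List Int) : List Int := PySem.List.slice t (some (8 * j)) (some (8 * j + 8))

-- the common shape both programs compute: for each of h lines, the 8 rows j,
-- each the concatenation of chunk j over the line's (clamped) run of W tiles
def natSpec (tiles : List (List Int)) (W h : Nat) : List (List Int) :=
  (List.range h).flatMap (fun i =>
    (PySem.List.pyRange 0 8).map (fun j => (((tiles.drop (W * i)).take W).flatMap (pvChunk j))))

lemma natSpec_one (tiles : List (List Int)) (W : Nat) :
    natSpec tiles W 1 = (PySem.List.pyRange 0 8).map (fun j => (tiles.take W).flatMap (pvChunk j)) := by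
  simp [natSpec, List.range_succ]

lemma natSpec_split (tiles : List (List Int)) (W h h1 : Nat) (h1le : h1 ≤ h) :
    natSpec tiles W h
      = natSpec (tiles.take (W * h1)) W h1 ++ natSpec (tiles.drop (W * h1)) W (h - h1) := by
  unfold natSpec
  rw [show List.range h = List.range h1 ++ (List.range (h - h1)).map (h1 + ·) by
        rw [← List.range_add]; congr 1; omega,
      List.flatMap_append, List.flatMap_map]
  congr 1
  · apply List.flatMap_congr
    intro i hi
    have hi' : i < h1 := List.mem_range.mp hi
    apply List.map_congr_left
    intro j _
    rw [List.drop_take, List.take_take]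
    have hmin : min W (W * h1 - W * i) = W := by
      have e1 : W * (i + 1) = W * i + W := Nat.mul_succ W i
      have e2 : W * (i + 1) ≤ W * h1 := Nat.mul_le_mul_left W (by omega)
      omega
    rw [hmin]
  · apply List.flatMap_congr
    intro i _
    apply List.map_congr_left
    intro j _
    rw [List.drop_drop, Nat.mul_add, Nat.add_comm]

-- B's line merge computes, for each j, the concatenation of chunk j over the line
lemma lineRows_eq (line : List (List Int)) :
    lineRows line = (PySem.List.pyRange 0 8).map (fun j => line.flatMap (pvChunk j)) := by
  induction line using lineRows.induct with
  | case1 line h0 =>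
    rw [lineRows, if_pos h0]
    rw [List.length_eq_zero_iff.mp h0]
    simp
  | case2 line h0 h1 =>
    rw [lineRows, if_neg h0, if_pos h1]
    obtain ⟨a, rfl⟩ := List.length_eq_one_iff.mp h1
    apply List.map_congr_left
    intro j _
    simp [PySem.List.pyGetD, PySem.List.pyIdx?, PySem.List.pyGet?, pvChunk]
  | case3 line h0 h1 m iha ihb =>
    rw [lineRows, if_neg h0, if_neg h1]
    simp only []
    rw [iha, ihb]
    apply List.map_congr_left
    intro j hj
    have hjb := (PySem.List.mem_pyRange_one).1 hj
    rw [PySem.List.pyGetD_map_pyRange_of_nonneg _ 8 j [] hjb.1 hjb.2,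
        PySem.List.pyGetD_map_pyRange_of_nonneg _ 8 j [] hjb.1 hjb.2]
    rw [PySem.List.slice_to_natCast, PySem.List.slice_from_natCast,
        ← List.flatMap_append, List.take_append_drop]

-- B equals the common shape
lemma B_eq_aux (n : Nat) : ∀ (tiles : List (List Int)) (tile_width tile_height : Int),
    tile_height.toNat = n →
    tiles_to_rows_alt tiles tile_width tile_height
      = natSpec tiles (max tile_width 0).toNat tile_height.toNat := by
  induction n using Nat.strong_induction_on with
  | _ n ih =>
    intro tiles tw th hn
    by_cases hle : th ≤ 0
    · rw [tiles_to_rows_alt, if_pos hle, show th.toNat = 0 by omega]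
      simp [natSpec]
    · by_cases h1 : th = 1
      · rw [tiles_to_rows_alt, if_neg hle, if_pos h1, h1]
        rw [lineRows_eq, show ((1:Int)).toNat = 1 from rfl, natSpec_one,
            PySem.List.slice_to tiles (le_max_right tw 0)]
      · rw [tiles_to_rows_alt, if_neg hle, if_neg h1]
        simp only []
        have hw : (0:Int) ≤ max tw 0 := le_max_right tw 0
        have hfd : PySem.Int.floordiv th 2 = th / 2 := PySem.Int.floordiv_eq_ediv_of_pos (by omega)
        have hh1 : (0:Int) ≤ PySem.Int.floordiv th 2 := by omega
        rw [ih (PySem.Int.floordiv th 2).toNat (by omega) _ _ _ rfl,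
            ih (th - PySem.Int.floordiv th 2).toNat (by omega) _ _ _ rfl]
        have hmul : ((max tw 0) * PySem.Int.floordiv th 2).toNat
            = (max tw 0).toNat * (PySem.Int.floordiv th 2).toNat := Int.toNat_mul hw hh1
        rw [PySem.List.slice_to tiles (by positivity), PySem.List.slice_from tiles (by positivity),
            hmul]
        rw [show (th - PySem.Int.floordiv th 2).toNat
              = th.toNat - (PySem.Int.floordiv th 2).toNat by omega]
        rw [← natSpec_split tiles (max tw 0).toNat th.toNat (PySem.Int.floordiv th 2).toNat
              (by omega)]

lemma B_eq (tiles : List (List Int)) (tile_width tile_height : Int) :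
    tiles_to_rows_alt tiles tile_width tile_height
      = natSpec tiles (max tile_width 0).toNat tile_height.toNat :=
  B_eq_aux tile_height.toNat tiles tile_width tile_height rfl

-- indexing a run of tiles pixel-offset by pixel-offset equals slicing the run out
lemma map_pyGetD_eq_slice (tiles : List (List Int)) (a w : Int)
    (h0 : 0 ≤ a) (hw : 0 < w) (hlen : a + w ≤ (tiles.length : Int)) :
    (PySem.List.pyRange 0 w).map (fun x => PySem.List.pyGetD tiles (a + x) [])
      = PySem.List.slice tiles (some a) (some (a + w)) := by
  rw [PySem.List.slice_of_nonneg tiles h0 (by omega) (by omega) (by omega)]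
  apply List.ext_getElem
  · simp [PySem.List.length_pyRange_one]
    omega
  · intro k h1 h2
    simp only [List.getElem_map, PySem.List.getElem_pyRange_one, List.getElem_take,
      List.getElem_drop]
    have hk : k < (w - 0).toNat := by simpa [PySem.List.length_pyRange_one] using h1
    rw [PySem.List.pyGetD_eq_getElem tiles [] (by omega) (by omega)]
    congr 1
    omega

lemma A_shape (tiles : List (List Int)) (tile_width tile_height : Int) :
    tiles_to_rows tiles tile_width tile_height
      = (PySem.List.pyRange 0 tile_height).flatMap (fun i =>
          (PySem.List.pyRange 0 8).map (fun j =>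
            (PySem.List.pyRange 0 tile_width).flatMap (fun x =>
              pvChunk j (PySem.List.pyGetD tiles (tile_width * i + x) [])))) := by
  have h8 : ∀ j : Int, (8 : Int) * (j + 1) = 8 * j + 8 := fun j => by ring
  simp only [tiles_to_rows, pvChunk, h8, PySem.List.foldl_append_eq_flatMap,
    List.nil_append]
  simp only [← List.map_eq_flatMap]

-- A equals the common shape on Pre_
lemma A_eq (tiles : List (List Int)) (tile_width tile_height : Int)
    (hpre : Pre_tiles_to_rows tiles tile_width tile_height) :
    tiles_to_rows tiles tile_width tile_height
      = natSpec tiles (max tile_width 0).toNat tile_height.toNat := by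
  rw [A_shape]
  unfold natSpec
  rw [PySem.List.pyRange_one 0 tile_height, List.flatMap_map, sub_zero]
  apply List.flatMap_congr
  intro k hk
  have hk' : k < tile_height.toNat := by simpa using List.mem_range.mp hk
  apply List.map_congr_left
  intro j _
  by_cases hw : tile_width ≤ 0
  · rw [PySem.List.pyRange_one_eq_nil hw]
    rw [show (max tile_width 0).toNat = 0 by omega]
    simp
  · rw [not_le] at hw
    have hlen : tile_width * (0 + (k : Int)) + tile_width ≤ (tiles.length : Int) := by
      rcases hpre with h | h | h
      · omega
      · omega
      · calc tile_width * (0 + (k : Int)) + tile_width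
            = tile_width * ((k : Int) + 1) := by ring
          _ ≤ tile_width * tile_height := by
              apply mul_le_mul_of_nonneg_left (by omega) (by omega)
          _ ≤ (tiles.length : Int) := h
    rw [(List.flatMap_map (fun x => PySem.List.pyGetD tiles (tile_width * (0 + (k:Int)) + x) [])
          (pvChunk j) (PySem.List.pyRange 0 tile_width)).symm,
        map_pyGetD_eq_slice tiles (tile_width * (0 + (k:Int))) tile_width
          (by positivity) hw hlen]
    rw [PySem.List.slice_toNat tiles (by positivity) (by positivity)]
    have h1 : (tile_width * (0 + (k:Int))).toNat = (max tile_width 0).toNat * k := by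
      rw [show (0 + (k:Int)) = ((k:Nat):Int) by omega,
          Int.toNat_mul (by omega) (by omega)]
      simp
      omega
    rw [h1]
    have h2 : (tile_width * (0 + (k:Int)) + tile_width).toNat
        - (max tile_width 0).toNat * k = (max tile_width 0).toNat := by
      have h0 : 0 ≤ tile_width * (0 + (k:Int)) := by positivity
      omega
    rw [h2]

-- ===== VERDICT (by name: the statement is the Claim_ definition above) =====
theorem tiles_to_rows_spec : Claim_equal_tiles_to_rows := by
  intro tiles tile_width tile_height _ hpre
  unfold Spec_tiles_to_rows
  rw [A_eq tiles tile_width tile_height hpre, B_eq]
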